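-- pv_equiv track=rewrite | github.com/SandraMavsar/AdventOfCode | 2023/Day_10/solution.py | coordinates_to_edge
-- ===== SOURCE A (Python) =====
-- def coordinates_to_edge(node, rows, cols, loop_line):
--     x, y = node
--     coordinates = [0, 0, 0, 0]
--
--     for i in range(x - 1, -1, -1):
--         if (i, y) in loop_line:
--             coordinates[0] += 1
--         if i == 0:
--             break
--
--     for i in range(x + 1, rows):
--         if (i, y) in loop_line:
--             coordinates[1] += 1
--         if i == rows - 1:
--             break
--
--     for j in range(y - 1, -1, -1):
--         if (x, j) in loop_line:
--             coordinates[2] += 1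
--         if j == 0:
--             break
--
--     for j in range(y + 1, cols):
--         if (x, j) in loop_line:
--             coordinates[3] += 1
--         if j == cols - 1:
--             break
--
--     crosses = 0
--     for i in coordinates:
--         if i % 2 != 0:
--             crosses += 1
--
--     if crosses == 4:
--         return True
--     else:
--         return False
-- ===== SOURCE B (Python) =====
-- def coordinates_to_edge(node, rows, cols, loop_line):
--     x, y = node
--     up = down = left = right = 0
--     for (i, j) in set(loop_line):
--         if j == y and 0 <= i < x:
--             up += 1
--         elif j == y and x < i < rows:
--             down += 1
--         elif i == x and 0 <= j < y:
--             left += 1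
--         elif i == x and y < j < cols:
--             right += 1
--     return up % 2 == 1 and down % 2 == 1 and left % 2 == 1 and right % 2 == 1
-- ===== Notes on version B (the rewrite author's own statement) =====
-- stated objective: faster
-- what changed: Replaces the four ray scans over grid coordinates (each doing a linear membership test in loop_line per cell) by a single pass over set(loop_line) that classifies each distinct loop cell into one of the four rays, then checks all four counts are odd.
import Mathlib
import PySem

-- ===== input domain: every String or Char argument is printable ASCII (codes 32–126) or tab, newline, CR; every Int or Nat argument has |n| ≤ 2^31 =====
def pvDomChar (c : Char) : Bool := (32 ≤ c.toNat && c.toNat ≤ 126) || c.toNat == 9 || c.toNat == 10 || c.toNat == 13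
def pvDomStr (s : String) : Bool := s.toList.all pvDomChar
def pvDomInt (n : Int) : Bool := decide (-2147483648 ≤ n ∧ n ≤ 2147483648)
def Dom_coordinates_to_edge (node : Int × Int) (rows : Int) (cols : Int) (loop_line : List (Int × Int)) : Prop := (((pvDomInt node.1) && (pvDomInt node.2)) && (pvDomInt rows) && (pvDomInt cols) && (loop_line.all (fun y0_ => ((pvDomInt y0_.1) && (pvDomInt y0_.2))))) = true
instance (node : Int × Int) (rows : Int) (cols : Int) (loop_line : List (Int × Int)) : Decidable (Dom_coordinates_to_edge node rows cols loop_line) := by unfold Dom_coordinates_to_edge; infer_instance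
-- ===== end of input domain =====

-- B replaces A's four ray scans over grid coordinates by one pass over set(loop_line)
-- classifying each distinct loop cell into a ray; objective: simpler.

-- ===== PORT A =====
-- one 'for i in <is>' loop of A: count membership hits, 'break' when i == stop
def pvScan (ll : List (Int × Int)) (mk : Int → Int × Int) (stop : Int) (acc : Int) : List Int → Int
  | [] => acc
  | i :: rest =>
      let acc' := acc + (if ll.contains (mk i) then 1 else 0)
      if i == stop then acc' else pvScan ll mk stop acc' rest

def coordinates_to_edge (node : Int × Int) (rows : Int) (cols : Int) (loop_line : List (Int × Int)) : Bool :=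
  let x := node.1
  let y := node.2
  let c0 := pvScan loop_line (fun i => (i, y)) 0 0 (PySem.List.pyRange (x - 1) (-1) (-1))
  let c1 := pvScan loop_line (fun i => (i, y)) (rows - 1) 0 (PySem.List.pyRange (x + 1) rows 1)
  let c2 := pvScan loop_line (fun j => (x, j)) 0 0 (PySem.List.pyRange (y - 1) (-1) (-1))
  let c3 := pvScan loop_line (fun j => (x, j)) (cols - 1) 0 (PySem.List.pyRange (y + 1) cols 1)
  let crosses := [c0, c1, c2, c3].foldl (fun acc c => if PySem.Int.mod c 2 ≠ 0 then acc + 1 else acc) (0 : Int)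
  if crosses == 4 then true else false

-- ===== PORT B =====
-- loop body of B's single pass: classify one distinct loop cell into one of the four rays
def pvStep (x y rows cols : Int) (acc : Int × Int × Int × Int) (p : Int × Int) : Int × Int × Int × Int :=
  let (up, down, left, right) := acc
  if p.2 == y && (decide ((0:Int) ≤ p.1) && decide (p.1 < x)) then (up + 1, down, left, right)
  else if p.2 == y && (decide (x < p.1) && decide (p.1 < rows)) then (up, down + 1, left, right)
  else if p.1 == x && (decide ((0:Int) ≤ p.2) && decide (p.2 < y)) then (up, down, left + 1, right)
  else if p.1 == x && (decide (y < p.2) && decide (p.2 < cols)) then (up, down, left, right + 1)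
  else acc

def coordinates_to_edge_alt (node : Int × Int) (rows : Int) (cols : Int) (loop_line : List (Int × Int)) : Bool :=
  let x := node.1
  let y := node.2
  let c := (PySem.Set.ofList loop_line).foldl (pvStep x y rows cols) (0, 0, 0, 0)
  (PySem.Int.mod c.1 2 == 1) && (PySem.Int.mod c.2.1 2 == 1) &&
  (PySem.Int.mod c.2.2.1 2 == 1) && (PySem.Int.mod c.2.2.2 2 == 1)

-- ===== PRECONDITION & SPEC =====
def Spec_coordinates_to_edge (node : Int × Int) (rows : Int) (cols : Int) (loop_line : List (Int × Int)) (out : Bool) : Prop := out = coordinates_to_edge_alt node rows cols loop_line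
instance (node : Int × Int) (rows : Int) (cols : Int) (loop_line : List (Int × Int)) (out : Bool) : Decidable (Spec_coordinates_to_edge node rows cols loop_line out) := by unfold Spec_coordinates_to_edge; infer_instance

-- ===== CLAIM (what is proved, stated in full; the proofs are below) =====
def Claim_equal_coordinates_to_edge : Prop := ∀ (node : Int × Int) (rows : Int) (cols : Int) (loop_line : List (Int × Int)), Dom_coordinates_to_edge node rows cols loop_line → Spec_coordinates_to_edge node rows cols loop_line (coordinates_to_edge node rows cols loop_line)

-- ===== LEMMAS AND PROOFS =====

-- The break never cuts the loop short when 'stop' can only be the last element.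
theorem pvScan_eq_countP (ll : List (Int × Int)) (mk : Int → Int × Int) (stop : Int) :
    ∀ is : List Int, ∀ acc : Int, (∀ i ∈ is.dropLast, i ≠ stop) →
      pvScan ll mk stop acc is = acc + (is.countP (fun i => ll.contains (mk i)) : Int) := by
  intro is
  induction is with
  | nil => intro acc _; simp [pvScan]
  | cons i rest ih =>
    intro acc h
    cases rest with
    | nil =>
      by_cases hs : i = stop <;> by_cases hc : ll.contains (mk i) <;>
        simp only [pvScan, List.countP_cons, List.countP_nil, hs, hc] <;> simp
    | cons j rest' =>
      have hi : i ≠ stop := h i (by simp [List.dropLast])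
      have h' : ∀ k ∈ (j :: rest').dropLast, k ≠ stop := by
        intro k hk; exact h k (by simp [List.dropLast] at hk ⊢; right; exact hk)
      have hbe : (i == stop) = false := by simp [hi]
      rw [pvScan, hbe]
      simp only [if_false, Bool.false_eq_true, ih _ h', List.countP_cons]
      by_cases hc : ll.contains (mk i) <;> simp only [hc] <;> simp <;> omega

-- bridge: counting range cells on the loop = counting distinct loop cells on the ray (row varies, column y fixed)
theorem count_ray_fst (ll : List (Int × Int)) (y a b : Int) :
    ((PySem.List.pyRange a b 1).countP (fun i => ll.contains (i, y)) : Int)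
      = ((PySem.Set.ofList ll).countP (fun p => p.2 == y && (decide (a ≤ p.1) && decide (p.1 < b))) : Int) := by
  congr 1
  rw [List.countP_eq_length_filter, List.countP_eq_length_filter]
  have h1 : ((PySem.List.pyRange a b 1).filter (fun i => ll.contains (i, y))).Nodup :=
    (PySem.List.nodup_pyRange_one a b).filter _
  have h2 : ((PySem.Set.ofList ll).filter (fun p => p.2 == y && (decide (a ≤ p.1) && decide (p.1 < b)))).Nodup :=
    (PySem.Set.nodup_ofList ll).filter _
  rw [← List.toFinset_card_of_nodup h1, ← List.toFinset_card_of_nodup h2]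
  have himg : ((PySem.Set.ofList ll).filter (fun p => p.2 == y && (decide (a ≤ p.1) && decide (p.1 < b)))).toFinset
      = Finset.image (fun i => (i, y)) ((PySem.List.pyRange a b 1).filter (fun i => ll.contains (i, y))).toFinset := by
    ext p
    obtain ⟨p1, p2⟩ := p
    simp [PySem.Set.mem_ofList, PySem.List.mem_pyRange_one]
    aesop
  rw [himg, Finset.card_image_of_injective _ (fun i j h => ((Prod.mk.injEq ..).mp h).1)]

-- same, column varies, row x fixed
theorem count_ray_snd (ll : List (Int × Int)) (x a b : Int) :
    ((PySem.List.pyRange a b 1).countP (fun j => ll.contains (x, j)) : Int)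
      = ((PySem.Set.ofList ll).countP (fun p => p.1 == x && (decide (a ≤ p.2) && decide (p.2 < b))) : Int) := by
  congr 1
  rw [List.countP_eq_length_filter, List.countP_eq_length_filter]
  have h1 : ((PySem.List.pyRange a b 1).filter (fun j => ll.contains (x, j))).Nodup :=
    (PySem.List.nodup_pyRange_one a b).filter _
  have h2 : ((PySem.Set.ofList ll).filter (fun p => p.1 == x && (decide (a ≤ p.2) && decide (p.2 < b)))).Nodup :=
    (PySem.Set.nodup_ofList ll).filter _
  rw [← List.toFinset_card_of_nodup h1, ← List.toFinset_card_of_nodup h2]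
  have himg : ((PySem.Set.ofList ll).filter (fun p => p.1 == x && (decide (a ≤ p.2) && decide (p.2 < b)))).toFinset
      = Finset.image (fun j => (x, j)) ((PySem.List.pyRange a b 1).filter (fun j => ll.contains (x, j))).toFinset := by
    ext p
    obtain ⟨p1, p2⟩ := p
    simp [PySem.Set.mem_ofList, PySem.List.mem_pyRange_one]
    aesop
  rw [himg, Finset.card_image_of_injective _ (fun i j h => ((Prod.mk.injEq ..).mp h).2)]

-- B's fold computes the four countP's of its branch predicates (mutually exclusive, so elif = independent counts)
theorem fold_counts (x y rows cols : Int) :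
    ∀ (s : List (Int × Int)) (u d l r : Int),
      s.foldl (pvStep x y rows cols) (u, d, l, r)
      = (u + s.countP (fun p => p.2 == y && (decide ((0:Int) ≤ p.1) && decide (p.1 < x))),
         d + s.countP (fun p => p.2 == y && (decide (x < p.1) && decide (p.1 < rows))),
         l + s.countP (fun p => p.1 == x && (decide ((0:Int) ≤ p.2) && decide (p.2 < y))),
         r + s.countP (fun p => p.1 == x && (decide (y < p.2) && decide (p.2 < cols)))) := by
  intro s
  induction s with
  | nil => intro u d l r; simp
  | cons p rest ih =>
    intro u d l r
    rw [List.foldl_cons]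
    by_cases h1 : (p.2 == y && (decide ((0:Int) ≤ p.1) && decide (p.1 < x))) = true
    · obtain ⟨hy, h0, hxlt⟩ : p.2 = y ∧ (0:Int) ≤ p.1 ∧ p.1 < x := by simpa using h1
      have h2 : ¬ ((p.2 == y && (decide (x < p.1) && decide (p.1 < rows))) = true) := by
        simp only [Bool.and_eq_true, beq_iff_eq, decide_eq_true_eq, not_and]
        intro _ h; omega
      have h3 : ¬ ((p.1 == x && (decide ((0:Int) ≤ p.2) && decide (p.2 < y))) = true) := by
        simp only [Bool.and_eq_true, beq_iff_eq, decide_eq_true_eq, not_and]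
        intro hx; omega
      have h4 : ¬ ((p.1 == x && (decide (y < p.2) && decide (p.2 < cols))) = true) := by
        simp only [Bool.and_eq_true, beq_iff_eq, decide_eq_true_eq, not_and]
        intro hx h; omega
      have hstep : pvStep x y rows cols (u, d, l, r) p = (u + 1, d, l, r) := by
        simp [pvStep, h1]
      rw [hstep, ih, List.countP_cons, List.countP_cons, List.countP_cons, List.countP_cons]
      simp only [h1, h2, h3, h4, Prod.mk.injEq]
      refine ⟨?_, ?_, ?_, ?_⟩ <;> push_cast <;> omega
    · by_cases h2 : (p.2 == y && (decide (x < p.1) && decide (p.1 < rows))) = true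
      · obtain ⟨hy, hxlt, hr⟩ : p.2 = y ∧ x < p.1 ∧ p.1 < rows := by simpa using h2
        have h3 : ¬ ((p.1 == x && (decide ((0:Int) ≤ p.2) && decide (p.2 < y))) = true) := by
          simp only [Bool.and_eq_true, beq_iff_eq, decide_eq_true_eq, not_and]
          intro hx; omega
        have h4 : ¬ ((p.1 == x && (decide (y < p.2) && decide (p.2 < cols))) = true) := by
          simp only [Bool.and_eq_true, beq_iff_eq, decide_eq_true_eq, not_and]
          intro hx h; omega
        have hstep : pvStep x y rows cols (u, d, l, r) p = (u, d + 1, l, r) := by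
          simp [pvStep, h1, h2]
        rw [hstep, ih, List.countP_cons, List.countP_cons, List.countP_cons, List.countP_cons]
        simp only [h1, h2, h3, h4, Prod.mk.injEq]
        refine ⟨?_, ?_, ?_, ?_⟩ <;> push_cast <;> omega
      · by_cases h3 : (p.1 == x && (decide ((0:Int) ≤ p.2) && decide (p.2 < y))) = true
        · obtain ⟨hx, h0, hyl⟩ : p.1 = x ∧ (0:Int) ≤ p.2 ∧ p.2 < y := by simpa using h3
          have h4 : ¬ ((p.1 == x && (decide (y < p.2) && decide (p.2 < cols))) = true) := by
            simp only [Bool.and_eq_true, beq_iff_eq, decide_eq_true_eq, not_and]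
            intro _ h; omega
          have hstep : pvStep x y rows cols (u, d, l, r) p = (u, d, l + 1, r) := by
            simp [pvStep, h1, h2, h3]
          rw [hstep, ih, List.countP_cons, List.countP_cons, List.countP_cons, List.countP_cons]
          simp only [h1, h2, h3, h4, Prod.mk.injEq]
          refine ⟨?_, ?_, ?_, ?_⟩ <;> push_cast <;> omega
        · by_cases h4 : (p.1 == x && (decide (y < p.2) && decide (p.2 < cols))) = true
          · have hstep : pvStep x y rows cols (u, d, l, r) p = (u, d, l, r + 1) := by
              simp [pvStep, h1, h2, h3, h4]
            rw [hstep, ih, List.countP_cons, List.countP_cons, List.countP_cons, List.countP_cons]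
            simp only [h1, h2, h3, h4, Prod.mk.injEq]
            refine ⟨?_, ?_, ?_, ?_⟩ <;> push_cast <;> omega
          · have hstep : pvStep x y rows cols (u, d, l, r) p = (u, d, l, r) := by
              simp [pvStep, h1, h2, h3, h4]
            rw [hstep, ih, List.countP_cons, List.countP_cons, List.countP_cons, List.countP_cons]
            simp [h1, h2, h3, h4]

-- the 'break's guard can only be the countdown range's last element 0
theorem dropLast_ne_down (a : Int) : ∀ i ∈ (PySem.List.pyRange (a - 1) (-1) (-1)).dropLast, i ≠ (0 : Int) := by
  intro i hi
  have heq : PySem.List.pyRange (a - 1) (-1) (-1) = (PySem.List.pyRange 0 a 1).reverse := by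
    have := PySem.List.pyRange_neg_one_eq_reverse (a := a - 1) (b := -1)
    simpa using this
  rw [heq, List.dropLast_reverse] at hi
  have hi' := List.mem_reverse.mp hi
  by_cases h : 0 < a
  · rw [PySem.List.pyRange_one_cons h, List.tail_cons] at hi'
    rcases (PySem.List.mem_pyRange_one).mp hi' with ⟨h1, _⟩
    omega
  · rw [PySem.List.pyRange_one_eq_nil (by omega)] at hi'
    simp at hi'

-- the 'break's guard can only be the upward range's last element b-1
theorem dropLast_ne_up (a b : Int) : ∀ i ∈ (PySem.List.pyRange a b 1).dropLast, i ≠ b - 1 := by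
  intro i hi
  by_cases h : a ≤ b - 1
  · have hsplit : PySem.List.pyRange a b 1 = PySem.List.pyRange a (b - 1) 1 ++ [b - 1] := by
      have := PySem.List.pyRange_one_succ_right (a := a) (b := b - 1) h
      simpa using this
    rw [hsplit, List.dropLast_concat] at hi
    rcases (PySem.List.mem_pyRange_one).mp hi with ⟨_, hlt⟩
    omega
  · rw [PySem.List.pyRange_one_eq_nil (by omega)] at hi
    simp at hi

-- countdown scan has no break effect and counts the upward range
theorem scan_down (ll : List (Int × Int)) (mk : Int → Int × Int) (a : Int) :
    pvScan ll mk 0 0 (PySem.List.pyRange (a - 1) (-1) (-1))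
      = ((PySem.List.pyRange 0 a 1).countP (fun i => ll.contains (mk i)) : Int) := by
  rw [pvScan_eq_countP ll mk 0 _ 0 (dropLast_ne_down a), zero_add]
  have heq : PySem.List.pyRange (a - 1) (-1) (-1) = (PySem.List.pyRange 0 a 1).reverse := by
    have := PySem.List.pyRange_neg_one_eq_reverse (a := a - 1) (b := -1)
    simpa using this
  rw [heq, List.countP_reverse]

theorem scan_up (ll : List (Int × Int)) (mk : Int → Int × Int) (a b : Int) :
    pvScan ll mk (b - 1) 0 (PySem.List.pyRange a b 1)
      = ((PySem.List.pyRange a b 1).countP (fun i => ll.contains (mk i)) : Int) := by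
  rw [pvScan_eq_countP ll mk (b - 1) _ 0 (dropLast_ne_up a b), zero_add]

-- closing arithmetic: 'crosses == 4' iff all four counts are odd
theorem pv_final (a b c d : Nat) :
    (if ((([(a : Int), (b : Int), (c : Int), (d : Int)].foldl
        (fun acc c => if PySem.Int.mod c 2 ≠ 0 then acc + 1 else acc) (0 : Int))) == 4) then true else false)
      = ((PySem.Int.mod (a : Int) 2 == 1) && ((PySem.Int.mod (b : Int) 2 == 1) &&
         ((PySem.Int.mod (c : Int) 2 == 1) && (PySem.Int.mod (d : Int) 2 == 1))) : Bool) := by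
  simp only [List.foldl_cons, List.foldl_nil]
  have ha := Int.emod_two_eq_zero_or_one (a : Int)
  have hb := Int.emod_two_eq_zero_or_one (b : Int)
  have hc := Int.emod_two_eq_zero_or_one (c : Int)
  have hd := Int.emod_two_eq_zero_or_one (d : Int)
  rcases ha with ha | ha <;> rcases hb with hb | hb <;> rcases hc with hc | hc <;>
    rcases hd with hd | hd <;> simp [ha, hb, hc, hd]

-- ===== VERDICT (by name: the statement is the Claim_ definition above) =====
theorem coordinates_to_edge_spec : Claim_equal_coordinates_to_edge := by
  intro node rows cols ll _
  unfold Spec_coordinates_to_edge coordinates_to_edge coordinates_to_edge_alt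
  simp only [scan_down, scan_up, count_ray_fst, count_ray_snd, fold_counts, zero_add, Int.add_one_le_iff]
  rw [pv_final]
  simp [Bool.and_assoc]
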